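-- pv_equiv track=rewrite | github.com/AMC-dyn/PyXSCAT | src/scattering_main_routine.py | orbitals_to_integers
-- ===== SOURCE A (Python) =====
-- def orbitals_to_integers(vec):
--     alpha = 0
--     beta = 0
--     comp = 0
--     a = True
--     b = False
--     for i in vec:
--         if i < comp:
--             b = True
--             a = False
--         if a:
--             alpha += 2 ** (i - 1)
--
--         if b:
--             beta += 2 ** (i - 1)
--
--         comp = i
--     return alpha, beta
-- ===== SOURCE B (Python) =====
-- def orbitals_to_integers(vec):
--     split = len(vec)
--     prev = 0
--     for idx, x in enumerate(vec):
--         if x < prev: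
--             split = idx
--             break
--         prev = x
--     alpha = sum(2 ** (x - 1) for x in vec[:split])
--     beta = sum(2 ** (x - 1) for x in vec[split:])
--     return alpha, beta
-- ===== Notes on version B (the rewrite author's own statement) =====
-- stated objective: simpler
-- what changed: Replaces the fused single-pass state machine with a/b boolean flags by first locating the split point (first element strictly below its predecessor, predecessor initialized to 0) and then summing 2**(x-1) over the two halves separately.
-- outside the precondition, e.g. on orbitals_to_integers([0]): A returns (0.5, 0), B returns (0.5, 0)
import Mathlib
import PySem

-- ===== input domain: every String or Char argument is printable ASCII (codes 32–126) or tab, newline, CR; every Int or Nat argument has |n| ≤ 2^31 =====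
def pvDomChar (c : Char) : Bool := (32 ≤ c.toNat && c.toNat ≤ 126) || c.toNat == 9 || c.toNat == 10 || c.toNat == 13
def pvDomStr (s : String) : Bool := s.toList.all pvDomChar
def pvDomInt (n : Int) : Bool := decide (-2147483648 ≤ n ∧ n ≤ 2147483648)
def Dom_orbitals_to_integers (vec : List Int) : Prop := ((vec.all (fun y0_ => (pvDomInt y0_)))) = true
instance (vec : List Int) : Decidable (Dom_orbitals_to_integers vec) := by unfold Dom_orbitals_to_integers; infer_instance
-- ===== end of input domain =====

-- B replaces A's fused flag state machine by a split-point search followed by two independent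
-- power sums over the halves (objective: simpler). Pre_ restricts to the natural domain of
-- orbital indices (all elements ≥ 1): on other inputs Python's 2**(x-1) is a float, so A's
-- return is not a value of the declared int pair type.


-- ===== PORT A =====
-- loop body of A's for-loop; state = (alpha, beta, comp, a, b)
def pvStepA (st : Int × Int × Int × Bool × Bool) (i : Int) : Int × Int × Int × Bool × Bool :=
  let (alpha, beta, comp, a, b) := st
  let (a, b) := if i < comp then (false, true) else (a, b)
  let alpha := if a then alpha + 2 ^ (i - 1).toNat else alpha
  let beta := if b then beta + 2 ^ (i - 1).toNat else beta
  (alpha, beta, i, a, b)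

def orbitals_to_integers (vec : List Int) : Int × Int :=
  let s := vec.foldl pvStepA (0, 0, 0, true, false)
  (s.1, s.2.1)

-- ===== PORT B =====
-- index of the first element strictly below its predecessor (predecessor starts at prev);
-- length of the list if there is none
def pvFindSplit (prev : Int) : List Int → Nat
  | [] => 0
  | x :: xs => if x < prev then 0 else pvFindSplit x xs + 1

-- 2 ** (x - 1)  (exact for x ≥ 1, the stated precondition)
def pvPow (x : Int) : Int := 2 ^ (x - 1).toNat

def orbitals_to_integers_alt (vec : List Int) : Int × Int :=
  let split := pvFindSplit 0 vec
  (((vec.take split).map pvPow).sum, ((vec.drop split).map pvPow).sum)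

-- ===== PRECONDITION & SPEC =====
-- Pre_ excludes lists containing an element ≤ 0: on those, Python's 2**(x-1) is a float, so A
-- (and B alike) return a float pair, not a value of the declared int-pair type.
def Pre_orbitals_to_integers (vec : List Int) : Prop := ∀ x ∈ vec, 1 ≤ x
instance (vec : List Int) : Decidable (Pre_orbitals_to_integers vec) := by unfold Pre_orbitals_to_integers; infer_instance
def pvWitness_orbitals_to_integers : List Int := [1, 3, 2]

def Spec_orbitals_to_integers (vec : List Int) (out : Int × Int) : Prop := out = orbitals_to_integers_alt vec
instance (vec : List Int) (out : Int × Int) : Decidable (Spec_orbitals_to_integers vec out) := by unfold Spec_orbitals_to_integers; infer_instance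

-- ===== CLAIM (what is proved, stated in full; the proofs are below) =====
def Claim_equal_orbitals_to_integers : Prop := ∀ (vec : List Int), Dom_orbitals_to_integers vec → Pre_orbitals_to_integers vec → Spec_orbitals_to_integers vec (orbitals_to_integers vec)

-- ===== LEMMAS AND PROOFS =====

-- step lemmas for A's loop body
theorem pvStepA_flagged (al be comp x : Int) :
    pvStepA (al, be, comp, false, true) x = (al, be + pvPow x, x, false, true) := by
  simp [pvStepA, pvPow]

theorem pvStepA_desc (al be prev x : Int) (h : x < prev) :
    pvStepA (al, be, prev, true, false) x = (al, be + pvPow x, x, false, true) := by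
  simp [pvStepA, pvPow, h]

theorem pvStepA_asc (al be prev x : Int) (h : ¬ x < prev) :
    pvStepA (al, be, prev, true, false) x = (al + pvPow x, be, x, true, false) := by
  simp [pvStepA, pvPow, h]

-- once the descent flag b is set (a = false, b = true), the loop only accumulates into beta
theorem pvStepA_beta_phase (l : List Int) : ∀ (al be comp : Int),
    ((l.foldl pvStepA (al, be, comp, false, true)).1,
     (l.foldl pvStepA (al, be, comp, false, true)).2.1)
    = (al, be + (l.map pvPow).sum) := by
  induction l with
  | nil => intro al be comp; simp
  | cons x xs ih =>
    intro al be comp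
    simp only [List.foldl_cons, pvStepA_flagged, ih, List.map_cons, List.sum_cons, add_assoc]

-- in the ascending phase (a = true, b = false) with predecessor prev, the remaining loop adds
-- the prefix up to the first descent to alpha and the rest to beta
theorem pvStepA_main (l : List Int) : ∀ (al be prev : Int),
    ((l.foldl pvStepA (al, be, prev, true, false)).1,
     (l.foldl pvStepA (al, be, prev, true, false)).2.1)
    = (al + ((l.take (pvFindSplit prev l)).map pvPow).sum,
       be + ((l.drop (pvFindSplit prev l)).map pvPow).sum) := by
  induction l with
  | nil => intro al be prev; simp
  | cons x xs ih =>
    intro al be prev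
    simp only [List.foldl_cons, pvFindSplit]
    by_cases h : x < prev
    · rw [if_pos h, pvStepA_desc al be prev x h]
      simp only [pvStepA_beta_phase, List.take_zero, List.map_nil, List.sum_nil, add_zero,
        List.drop_zero, List.map_cons, List.sum_cons, add_assoc]
    · rw [if_neg h, pvStepA_asc al be prev x h]
      simp only [ih, List.take_succ_cons, List.drop_succ_cons, List.map_cons, List.sum_cons,
        add_assoc]

theorem orbitals_to_integers_spec : Claim_equal_orbitals_to_integers := by
  intro vec _ _
  unfold Spec_orbitals_to_integers orbitals_to_integers orbitals_to_integers_alt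
  have h := pvStepA_main vec 0 0 0
  simp only [zero_add] at h
  simp only [Prod.ext_iff] at h ⊢
  exact h
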